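-- pv_equiv track=rewrite | github.com/matrixproduct/Regex-Engine | regex.py | comp_begin
-- ===== SOURCE A (Python) =====
-- def comp_begin(text, regex):  # check if the beginning of text matches with regex
--     if not regex:
--         return True
--     if not text:
--         return False
--     if regex[0] == '.' or regex[0] == text[0]:
--         return comp_begin(text[1:], regex[1:])
--     return False
-- ===== SOURCE B (Python) =====
-- def comp_begin(text, regex):  # check if the beginning of text matches with regex
--     if len(regex) > len(text):
--         return False
--     return all(r == '.' or r == t for r, t in zip(regex, text))
-- ===== Notes on version B (the rewrite author's own statement) =====
-- stated objective: faster
-- what changed: replaced the recursive char-by-char slicing (each text[1:]/regex[1:] copies the remaining string) with a single length check plus one zip pass over index pairs, no slicing or recursion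
import Mathlib
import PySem

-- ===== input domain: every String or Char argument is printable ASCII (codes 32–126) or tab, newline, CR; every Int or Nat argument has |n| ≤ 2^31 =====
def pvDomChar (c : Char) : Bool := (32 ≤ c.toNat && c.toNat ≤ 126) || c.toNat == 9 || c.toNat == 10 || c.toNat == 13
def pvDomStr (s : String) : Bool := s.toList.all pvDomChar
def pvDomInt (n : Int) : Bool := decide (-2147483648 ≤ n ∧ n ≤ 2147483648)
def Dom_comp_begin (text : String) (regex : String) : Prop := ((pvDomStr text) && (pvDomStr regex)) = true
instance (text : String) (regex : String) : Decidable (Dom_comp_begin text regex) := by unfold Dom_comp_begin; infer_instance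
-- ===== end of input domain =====

-- B replaces A's recursive slicing with one length check plus a single zip pass (faster: no per-step string copies).
-- ===== PORT A =====
-- literal transliteration of A: recursion on the two character lists, branches in source order
def compBeginRec : List Char → List Char → Bool
  | _, [] => true          -- if not regex: return True
  | [], _ => false         -- if not text: return False
  | t :: ts, r :: rs =>    -- if regex[0] == '.' or regex[0] == text[0]: recurse; else False
      if r == '.' || r == t then compBeginRec ts rs else false

def comp_begin (text : String) (regex : String) : Bool :=
  compBeginRec text.toList regex.toList

-- ===== PORT B =====
def comp_begin_alt (text : String) (regex : String) : Bool :=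
  if regex.toList.length > text.toList.length then false
  else (List.zip regex.toList text.toList).all (fun p => p.1 == '.' || p.1 == p.2)

-- ===== PRECONDITION & SPEC =====
def Spec_comp_begin (text : String) (regex : String) (out : Bool) : Prop := out = comp_begin_alt text regex
instance (text : String) (regex : String) (out : Bool) : Decidable (Spec_comp_begin text regex out) := by unfold Spec_comp_begin; infer_instance

-- ===== CLAIM (what is proved, stated in full; the proofs are below) =====
def Claim_equal_comp_begin : Prop := ∀ (text : String) (regex : String), Dom_comp_begin text regex → Spec_comp_begin text regex (comp_begin text regex)

-- ===== LEMMAS AND PROOFS =====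

-- ===== VERDICT (by name: the statement is the Claim_ definition above) =====
lemma compBeginRec_eq (ts rs : List Char) :
    compBeginRec ts rs =
      (if rs.length > ts.length then false
       else (List.zip rs ts).all (fun p => p.1 == '.' || p.1 == p.2)) := by
  induction ts generalizing rs with
  | nil => cases rs <;> simp [compBeginRec]
  | cons t ts ih =>
    cases rs with
    | nil => simp [compBeginRec]
    | cons r rs =>
      simp only [compBeginRec, List.zip_cons_cons, List.all_cons, List.length_cons, ih]
      by_cases h : (r == '.' || r == t) = true <;> simp [h]

theorem comp_begin_spec : Claim_equal_comp_begin := by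
  intro text regex _
  unfold Spec_comp_begin comp_begin comp_begin_alt
  exact compBeginRec_eq _ _
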